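-- pv_equiv track=rewrite | github.com/wonny-Jo/algorithm | 카카오 코딩테스트/2020 KAKAO BLIND RECRUITMENT/외벽 점검.py | solution
-- ===== SOURCE A (Python) =====
-- from itertools import permutations
--
-- def solution(n, weak, dist):
--     numOfWeak=len(weak)
--     for i in range(numOfWeak):
--         weak.append(weak[i]+n)
--     for i in range(1,len(dist)+1):
--         subDist=dist[-i:]
--         start=0
--         while start<numOfWeak:
--             for subDistTemp in list(map(list,permutations(subDist,i))):
--                 startPos=start
--                 endNum=weak[start]
--                 cnt=0
--                 for distNum in subDistTemp:
--                     endNum+=distNum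
--                     while weak[startPos]<=endNum:
--                         cnt+=1
--                         startPos+=1
--                         if cnt==numOfWeak:
--                             return i
--                     endNum=weak[startPos]
--             start+=1
--
--     return -1
-- ===== SOURCE B (Python) =====
-- def solution(n, weak, dist):
--     numW = len(weak)
--     w2 = weak + [x + n for x in weak]
--     L = len(dist)
--     for i in range(1, L + 1):
--         ds = tuple(dist[L - i:])
--         for start in range(numW):
--             target = start + numW
--             frontier = {(ds, start)}
--             ok = False
--             while frontier and not ok:
--                 nxt = set()
--                 for rem, pos in frontier:
--                     for k in range(len(rem)):
--                         p = pos
--                         end = w2[p] + rem[k]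
--                         while p < target and w2[p] <= end:
--                             p += 1
--                         if p == target:
--                             ok = True
--                         else:
--                             nxt.add((rem[:k] + rem[k + 1:], p))
--                 frontier = nxt
--             if ok:
--                 return i
--     return -1
-- ===== Notes on version B (the rewrite author's own statement) =====
-- stated objective: alternative
-- what changed: B replaces A's per-start enumeration of all i! permutations (each simulated from scratch) by a level-synchronous BFS over a deduplicated frontier of (remaining-distances, position) states, expanding each distinct state once per layer instead of once per ordering; intended as faster (measured 45x at the largest size both finished, but B also timed out on some adversarial large inputs, so not recorded as faster).
import Mathlib
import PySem

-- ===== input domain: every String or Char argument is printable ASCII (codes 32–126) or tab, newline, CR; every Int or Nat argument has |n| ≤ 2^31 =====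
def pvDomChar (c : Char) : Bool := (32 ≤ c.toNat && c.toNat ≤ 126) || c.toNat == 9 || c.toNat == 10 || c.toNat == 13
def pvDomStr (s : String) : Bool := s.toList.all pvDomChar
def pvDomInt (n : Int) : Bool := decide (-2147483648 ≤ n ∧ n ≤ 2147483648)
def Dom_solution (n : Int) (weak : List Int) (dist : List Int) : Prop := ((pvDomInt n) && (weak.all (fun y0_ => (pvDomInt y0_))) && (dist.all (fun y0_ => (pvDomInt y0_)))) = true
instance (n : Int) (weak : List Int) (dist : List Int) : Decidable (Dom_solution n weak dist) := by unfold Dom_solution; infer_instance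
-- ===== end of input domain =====

-- B replaces A's per-start enumeration of all i! permutations by a level-synchronous BFS over a
-- deduplicated frontier of (remaining-distances, position) states; equivalence is about the
-- RETURN value only — Python A also extends `weak` in place, B does not.

-- ===== PORT A =====
-- the inner `while weak[startPos] <= endNum` advance loop of A
def advPos (w2 : List Int) (target : Nat) (pos : Nat) (endN : Int) : Nat :=
  if pos < target then
    if w2.getD pos 0 ≤ endN then advPos w2 target (pos + 1) endN else pos
  else pos
termination_by target - pos

-- A's simulation of one permutation `subDistTemp` from position `pos` (cnt == numOfWeak ↔ pos = target)
def simA (w2 : List Int) (target : Nat) : Nat → List Int → Bool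
  | _, [] => false
  | pos, d :: ds =>
    let p := advPos w2 target pos (w2.getD pos 0 + d)
    if p == target then true else simA w2 target p ds

-- the `for i in range(1, len(dist)+1)` loop with its early `return i`
def solGoA (w2 : List Int) (numW : Nat) (dist : List Int) (i : Nat) : Int :=
  if i ≤ dist.length then
    let subDist := PySem.List.slice dist (some (-(i : Int))) none
    if (List.range numW).any (fun s =>
        (PySem.List.permutations subDist i).any (fun p => simA w2 (s + numW) s p)) then
      (i : Int)
    else solGoA w2 numW dist (i + 1)
  else -1
termination_by dist.length + 1 - i

def solution (n : Int) (weak : List Int) (dist : List Int) : Int :=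
  let numW := weak.length
  let w2 := weak ++ weak.map (fun x => x + n)
  solGoA w2 numW dist 1

-- ===== PORT B =====
-- Source B's `while p < target and w2[p] <= end: p += 1`, made total with fuel (fuel `target` always
-- suffices: the loop body only runs while p < target)
def stepB (w2 : List Int) (target : Nat) (endN : Int) : Nat → Nat → Nat
  | 0, p => p
  | fuel + 1, p => if p < target ∧ w2.getD p 0 ≤ endN then stepB w2 target endN fuel (p + 1) else p

-- Source B's inner `for k in range(len(rem))`: accumulate (ok, nxt) over one frontier state
def expandState (w2 : List Int) (target : Nat) (ac : Bool × PySem.Set (List Int × Nat))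
    (st : List Int × Nat) : Bool × PySem.Set (List Int × Nat) :=
  (List.range st.1.length).foldl (fun ac2 k =>
    let p := stepB w2 target (w2.getD st.2 0 + st.1.getD k 0) target st.2
    if p == target then (true, ac2.2)
    else (ac2.1, PySem.Set.add ac2.2 (st.1.eraseIdx k, p))) ac

-- Source B's `for rem, pos in frontier` building (ok, nxt)
def expandAll (w2 : List Int) (target : Nat) (frontier : PySem.Set (List Int × Nat)) :
    Bool × PySem.Set (List Int × Nat) :=
  frontier.foldl (expandState w2 target) (false, PySem.Set.empty)

-- Source B's `while frontier and not ok` layer loop; fuel only makes it total (every layer shortens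
-- each remaining tuple by one, so ds.length + 2 layers always suffice)
def bfsLoop (w2 : List Int) (target : Nat) : Nat → PySem.Set (List Int × Nat) → Bool
  | 0, _ => false
  | fuel + 1, frontier =>
    if frontier.isEmpty then false
    else
      let pr := expandAll w2 target frontier
      if pr.1 then true else bfsLoop w2 target fuel pr.2

def bfsB (w2 : List Int) (target : Nat) (ds : List Int) (start : Nat) : Bool :=
  bfsLoop w2 target (ds.length + 2) (PySem.Set.ofList [(ds, start)])

def solGoB (w2 : List Int) (numW : Nat) (dist : List Int) (i : Nat) : Int :=
  if i ≤ dist.length then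
    let ds := dist.drop (dist.length - i)
    if (List.range numW).any (fun s => bfsB w2 (s + numW) ds s) then (i : Int)
    else solGoB w2 numW dist (i + 1)
  else -1
termination_by dist.length + 1 - i

def solution_alt (n : Int) (weak : List Int) (dist : List Int) : Int :=
  let numW := weak.length
  let w2 := weak ++ weak.map (fun x => x + n)
  solGoB w2 numW dist 1

-- ===== PRECONDITION & SPEC =====
def Spec_solution (n : Int) (weak : List Int) (dist : List Int) (out : Int) : Prop := out = solution_alt n weak dist
instance (n : Int) (weak : List Int) (dist : List Int) (out : Int) : Decidable (Spec_solution n weak dist out) := by unfold Spec_solution; infer_instance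

-- ===== CLAIM (what is proved, stated in full; the proofs are below) =====
def Claim_equal_solution : Prop := ∀ (n : Int) (weak : List Int) (dist : List Int), Dom_solution n weak dist → Spec_solution n weak dist (solution n weak dist)

-- ===== LEMMAS AND PROOFS =====

-- proof-only backtracking characterisation: "some order of rem reaches target from pos"
def dfsBF (w2 : List Int) (target : Nat) : Nat → Nat → List Int → Bool
  | 0, _, _ => false
  | fuel + 1, pos, rem =>
    (List.range rem.length).any (fun k =>
      let p := advPos w2 target pos (w2.getD pos 0 + rem.getD k 0)
      p == target || dfsBF w2 target fuel p (rem.eraseIdx k))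

-- B's fueled while loop equals A's advance loop (fuel `target` suffices)
lemma stepB_eq_advPos_aux (w2 : List Int) (target : Nat) (endN : Int) :
    ∀ (fuel p : Nat), target ≤ p + fuel → stepB w2 target endN fuel p = advPos w2 target p endN := by
  intro fuel
  induction fuel with
  | zero =>
    intro p h
    rw [stepB, advPos]
    have : ¬ p < target := by omega
    simp [this]
  | succ f ih =>
    intro p h
    rw [stepB, advPos]
    by_cases h1 : p < target
    · rw [if_pos h1]
      by_cases h2 : w2.getD p 0 ≤ endN
      · rw [if_pos ⟨h1, h2⟩, if_pos h2]
        exact ih (p + 1) (by omega)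
      · rw [if_neg (fun hx => h2 hx.2), if_neg h2]
    · rw [if_neg (fun hx => h1 hx.1), if_neg h1]

lemma stepB_eq_advPos (w2 : List Int) (target : Nat) (endN : Int) (p : Nat) :
    stepB w2 target endN target p = advPos w2 target p endN :=
  stepB_eq_advPos_aux w2 target endN target p (by omega)

-- generic shape of the inner fold of expandState
lemma foldl_hitgen_fst (hit : Nat → Bool) (gen : Nat → (List Int × Nat)) :
    ∀ (ks : List Nat) (ac : Bool × PySem.Set (List Int × Nat)),
    (ks.foldl (fun ac2 k => if hit k then (true, ac2.2)
        else (ac2.1, PySem.Set.add ac2.2 (gen k))) ac).1 = (ac.1 || ks.any hit) := by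
  intro ks
  induction ks with
  | nil => intro ac; simp
  | cons k t ih =>
    intro ac
    rw [List.foldl_cons, List.any_cons]
    by_cases hk : hit k
    · simp [hk, ih]
    · simp only [hk, Bool.false_eq_true, if_false]
      rw [ih]
      simp

lemma foldl_hitgen_mem (hit : Nat → Bool) (gen : Nat → (List Int × Nat)) :
    ∀ (ks : List Nat) (ac : Bool × PySem.Set (List Int × Nat)) (x : List Int × Nat),
    (x ∈ (ks.foldl (fun ac2 k => if hit k then (true, ac2.2)
        else (ac2.1, PySem.Set.add ac2.2 (gen k))) ac).2
      ↔ x ∈ ac.2 ∨ ∃ k ∈ ks, hit k = false ∧ x = gen k) := by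
  intro ks
  induction ks with
  | nil => intro ac x; simp
  | cons k t ih =>
    intro ac x
    rw [List.foldl_cons]
    by_cases hk : hit k = true
    · simp only [hk, if_true]
      rw [ih]
      constructor
      · rintro (h | ⟨j, hj, hh, hx⟩)
        · exact Or.inl h
        · exact Or.inr ⟨j, List.mem_cons_of_mem _ hj, hh, hx⟩
      · rintro (h | ⟨j, hj, hh, hx⟩)
        · exact Or.inl h
        · rcases List.mem_cons.mp hj with rfl | hj'
          · rw [hk] at hh; cases hh
          · exact Or.inr ⟨j, hj', hh, hx⟩
    · have hkf : hit k = false := Bool.eq_false_iff.mpr hk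
      simp only [hkf, Bool.false_eq_true, if_false]
      rw [ih]
      simp only [PySem.Set.mem_add, List.mem_cons]
      constructor
      · rintro (⟨h | h⟩ | ⟨j, hj, hhit, hx⟩)
        · exact Or.inl h
        · exact Or.inr ⟨k, Or.inl rfl, hkf, h⟩
        · exact Or.inr ⟨j, Or.inr hj, hhit, hx⟩
      · rintro (h | ⟨j, (rfl | hj), hhit, hx⟩)
        · exact Or.inl (Or.inl h)
        · exact Or.inl (Or.inr hx)
        · exact Or.inr ⟨j, hj, hhit, hx⟩

-- hit / successor-state of a frontier state, as expandState computes them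
def hitK (w2 : List Int) (target : Nat) (st : List Int × Nat) (k : Nat) : Bool :=
  stepB w2 target (w2.getD st.2 0 + st.1.getD k 0) target st.2 == target

def genK (w2 : List Int) (target : Nat) (st : List Int × Nat) (k : Nat) : List Int × Nat :=
  (st.1.eraseIdx k, stepB w2 target (w2.getD st.2 0 + st.1.getD k 0) target st.2)

def stHit (w2 : List Int) (target : Nat) (st : List Int × Nat) : Bool :=
  (List.range st.1.length).any (hitK w2 target st)

lemma expandState_fst (w2 : List Int) (target : Nat) (ac : Bool × PySem.Set (List Int × Nat))
    (st : List Int × Nat) :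
    (expandState w2 target ac st).1 = (ac.1 || stHit w2 target st) := by
  unfold expandState stHit
  exact foldl_hitgen_fst (hitK w2 target st) (genK w2 target st) _ ac

lemma expandState_mem (w2 : List Int) (target : Nat) (ac : Bool × PySem.Set (List Int × Nat))
    (st : List Int × Nat) (x : List Int × Nat) :
    (x ∈ (expandState w2 target ac st).2
      ↔ x ∈ ac.2 ∨ ∃ k ∈ List.range st.1.length, hitK w2 target st k = false ∧ x = genK w2 target st k) := by
  unfold expandState
  exact foldl_hitgen_mem (hitK w2 target st) (genK w2 target st) _ ac x

lemma expandGo_fst (w2 : List Int) (target : Nat) :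
    ∀ (sts : List (List Int × Nat)) (ac : Bool × PySem.Set (List Int × Nat)),
    (sts.foldl (expandState w2 target) ac).1 = (ac.1 || sts.any (stHit w2 target)) := by
  intro sts
  induction sts with
  | nil => intro ac; simp
  | cons s t ih =>
    intro ac
    rw [List.foldl_cons, ih, expandState_fst, List.any_cons, Bool.or_assoc]

lemma expandGo_mem (w2 : List Int) (target : Nat) :
    ∀ (sts : List (List Int × Nat)) (ac : Bool × PySem.Set (List Int × Nat)) (x : List Int × Nat),
    (x ∈ (sts.foldl (expandState w2 target) ac).2
      ↔ x ∈ ac.2 ∨ ∃ st ∈ sts, ∃ k ∈ List.range st.1.length,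
          hitK w2 target st k = false ∧ x = genK w2 target st k) := by
  intro sts
  induction sts with
  | nil => intro ac x; simp
  | cons s t ih =>
    intro ac x
    rw [List.foldl_cons, ih]
    rw [expandState_mem]
    simp only [List.mem_cons]
    constructor
    · rintro ((h | ⟨k, hk, hh, hx⟩) | ⟨st, hst, hrest⟩)
      · exact Or.inl h
      · exact Or.inr ⟨s, Or.inl rfl, k, hk, hh, hx⟩
      · exact Or.inr ⟨st, Or.inr hst, hrest⟩
    · rintro (h | ⟨st, (rfl | hst), hrest⟩)
      · exact Or.inl (Or.inl h)
      · exact Or.inl (Or.inr hrest)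
      · exact Or.inr ⟨st, hst, hrest⟩

lemma expandAll_fst (w2 : List Int) (target : Nat) (frontier : PySem.Set (List Int × Nat)) :
    (expandAll w2 target frontier).1 = frontier.any (stHit w2 target) := by
  unfold expandAll
  rw [expandGo_fst]
  simp

lemma expandAll_mem (w2 : List Int) (target : Nat) (frontier : PySem.Set (List Int × Nat))
    (x : List Int × Nat) :
    (x ∈ (expandAll w2 target frontier).2
      ↔ ∃ st ∈ frontier, ∃ k ∈ List.range st.1.length,
          hitK w2 target st k = false ∧ x = genK w2 target st k) := by
  unfold expandAll
  rw [expandGo_mem]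
  simp [PySem.Set.empty]

-- value F of a frontier state under the backtracking characterisation
lemma dfsBF_state (w2 : List Int) (target : Nat) (rem : List Int) (pos : Nat) :
    dfsBF w2 target rem.length pos rem
      = (List.range rem.length).any (fun k =>
          hitK w2 target (rem, pos) k
            || dfsBF w2 target (rem.eraseIdx k).length (genK w2 target (rem, pos) k).2 (rem.eraseIdx k)) := by
  cases hrem : rem with
  | nil => simp [dfsBF]
  | cons d ds =>
    rw [← hrem]
    have hlen : rem.length = ds.length + 1 := by rw [hrem]; simp
    rw [hlen, dfsBF, ← hlen]
    apply PySem.List.any_congr_mem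
    intro k hk
    have hk' : k < rem.length := List.mem_range.mp hk
    have he : (rem.eraseIdx k).length = ds.length := by
      rw [List.length_eraseIdx_of_lt hk', hlen]
      omega
    simp only [hitK, genK, stepB_eq_advPos, he]

-- the BFS layer loop computes "some frontier state can finish"
lemma bfsLoop_eq (w2 : List Int) (target : Nat) :
    ∀ (fuel : Nat) (frontier : PySem.Set (List Int × Nat)),
    (∀ st ∈ frontier, st.1.length < fuel) →
    bfsLoop w2 target fuel frontier
      = frontier.any (fun st => dfsBF w2 target st.1.length st.2 st.1) := by
  intro fuel
  induction fuel with
  | zero =>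
    intro frontier h
    cases frontier with
    | nil => simp [bfsLoop]
    | cons s t => exact absurd (h s (by simp)) (by omega)
  | succ fuel ih =>
    intro frontier h
    rw [bfsLoop]
    cases hfr : frontier.isEmpty with
    | true =>
      have : frontier = [] := List.isEmpty_iff.mp hfr
      simp [this]
    | false =>
      simp only [Bool.false_eq_true, if_false]
      rw [expandAll_fst]
      cases hok : frontier.any (stHit w2 target) with
      | true =>
        simp only [if_true]
        obtain ⟨st, hst, hhit⟩ := List.any_eq_true.mp hok
        obtain ⟨k, hk, hkhit⟩ := List.any_eq_true.mp hhit
        symm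
        apply List.any_eq_true.mpr
        refine ⟨st, hst, ?_⟩
        rw [show st = (st.1, st.2) from rfl] at hkhit hk ⊢
        rw [dfsBF_state]
        exact List.any_eq_true.mpr ⟨k, hk, by simp [hkhit]⟩
      | false =>
        simp only [Bool.false_eq_true, if_false]
        have hnohit : ∀ st ∈ frontier, ∀ k ∈ List.range st.1.length, hitK w2 target st k = false := by
          intro st hst k hk
          have h1 : stHit w2 target st = false :=
            Bool.eq_false_iff.mpr (List.any_eq_false.mp hok st hst)
          unfold stHit at h1
          exact Bool.eq_false_iff.mpr (List.any_eq_false.mp h1 k hk)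
        have hbound : ∀ x ∈ (expandAll w2 target frontier).2, x.1.length < fuel := by
          intro x hx
          obtain ⟨st, hst, k, hk, _, rfl⟩ := (expandAll_mem w2 target frontier x).mp hx
          have hk' : k < st.1.length := List.mem_range.mp hk
          have := h st hst
          simp only [genK]
          rw [List.length_eraseIdx_of_lt hk']
          omega
        rw [ih _ hbound]
        rw [Bool.eq_iff_iff]
        simp only [List.any_eq_true]
        constructor
        · rintro ⟨x, hx, hdfs⟩
          obtain ⟨st, hst, k, hk, hh, rfl⟩ := (expandAll_mem w2 target frontier x).mp hx
          refine ⟨st, hst, ?_⟩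
          rw [show st = (st.1, st.2) from rfl] at hk ⊢
          rw [dfsBF_state]
          apply List.any_eq_true.mpr
          refine ⟨k, hk, ?_⟩
          rw [Bool.or_eq_true]
          refine Or.inr ?_
          simp only [genK] at hdfs ⊢
          simp only [List.getD_eq_getElem?_getD] at hdfs ⊢
          exact hdfs
        · rintro ⟨st, hst, hdfs⟩
          rw [show st = (st.1, st.2) from rfl] at hdfs
          rw [dfsBF_state] at hdfs
          obtain ⟨k, hk, hor⟩ := List.any_eq_true.mp hdfs
          have hh : hitK w2 target (st.1, st.2) k = false := hnohit st hst k (by simpa using hk)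
          rw [hh] at hor
          simp only [Bool.false_or] at hor
          refine ⟨genK w2 target (st.1, st.2) k, ?_, ?_⟩
          · apply (expandAll_mem w2 target frontier _).mpr
            exact ⟨st, hst, k, by simpa using hk, hh, by rw [show st = (st.1, st.2) from rfl]⟩
          · simpa [genK] using hor
  
lemma bfsB_eq_dfsBF (w2 : List Int) (target : Nat) (ds : List Int) (start : Nat) :
    bfsB w2 target ds start = dfsBF w2 target ds.length start ds := by
  unfold bfsB
  have hof : PySem.Set.ofList [(ds, start)] = [(ds, start)] :=
    PySem.Set.ofList_eq_self_of_nodup _ (List.nodup_singleton _)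
  rw [hof, bfsLoop_eq]
  · simp
  · intro st hst
    simp only [List.mem_singleton] at hst
    subst hst
    show ds.length < ds.length + 2
    omega

-- dist[-i:] (1 ≤ i) is a drop
lemma slice_neg_eq_drop (dist : List Int) (i : Nat) (hi : 1 ≤ i) :
    PySem.List.slice dist (some (-(i : Int))) none = dist.drop (dist.length - i) := by
  have hc : PySem.List.clampIdx dist.length (-(i : Int)) = dist.length - i := by
    unfold PySem.List.clampIdx
    split_ifs with h1 h2 <;> omega
  simp [PySem.List.slice, hc]

-- full-length permutation lists are never empty
lemma permutations_ne_nil (r : Nat) : ∀ (xs : List Int), xs.length = r →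
    PySem.List.permutations xs r ≠ [] := by
  induction r with
  | zero => intro xs h; simp [PySem.List.permutations]
  | succ r ih =>
    intro xs h
    rw [PySem.List.permutations]
    simp only [ne_eq, List.flatMap_eq_nil_iff, not_forall]
    refine ⟨0, ?_, ?_⟩
    · simp; omega
    · have h0 : xs[0]? = some (xs.getD 0 0) := by
        cases xs with
        | nil => simp at h
        | cons a t => simp
      rw [h0]
      simp only [List.map_eq_nil_iff]
      apply ih
      simp; omega

-- trying every permutation of xs with A's simulation = the backtracking characterisation
lemma perms_any_eq_dfsBF (w2 : List Int) (target : Nat) (r : Nat) :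
    ∀ (pos : Nat) (xs : List Int), xs.length = r →
    (PySem.List.permutations xs r).any (fun p => simA w2 target pos p)
      = dfsBF w2 target r pos xs := by
  induction r with
  | zero => intro pos xs h; simp [PySem.List.permutations, dfsBF, simA]
  | succ r ih =>
    intro pos xs h
    rw [PySem.List.permutations, dfsBF, List.any_flatMap]
    apply PySem.List.any_congr_mem
    intro k hk
    have hk' : k < xs.length := List.mem_range.mp hk
    have h0 : xs[k]? = some (xs.getD k 0) := by
      rw [List.getElem?_eq_getElem hk']
      simp [List.getD_eq_getElem?_getD, List.getElem?_eq_getElem hk']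
    rw [h0]
    simp only [List.any_map]
    have hlen : (xs.eraseIdx k).length = r := by
      simp [List.length_eraseIdx, hk']; omega
    cases hp : (advPos w2 target pos (w2.getD pos 0 + xs.getD k 0) == target) with
    | true =>
      simp only [Function.comp_def, simA, hp, if_true, Bool.true_or]
      obtain ⟨q, hq⟩ := List.exists_mem_of_ne_nil _ (permutations_ne_nil r _ hlen)
      exact List.any_eq_true.mpr ⟨q, hq, rfl⟩
    | false =>
      simp only [Function.comp_def, simA, hp, Bool.false_eq_true, if_false, Bool.false_or]
      exact ih _ _ hlen

lemma solGoA_eq_solGoB (w2 : List Int) (numW : Nat) (dist : List Int) :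
    ∀ (i : Nat), 1 ≤ i → solGoA w2 numW dist i = solGoB w2 numW dist i := by
  have key : ∀ (m i : Nat), dist.length + 1 - i ≤ m → 1 ≤ i →
      solGoA w2 numW dist i = solGoB w2 numW dist i := by
    intro m
    induction m with
    | zero =>
      intro i hm hi
      rw [solGoA, solGoB]
      have : ¬ i ≤ dist.length := by omega
      simp [this]
    | succ m ihm =>
      intro i hm hi
      rw [solGoA, solGoB]
      by_cases hile : i ≤ dist.length
      · simp only [hile, if_true]
        have hds : PySem.List.slice dist (some (-(i : Int))) none
            = dist.drop (dist.length - i) := slice_neg_eq_drop dist i hi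
        have hlen : (dist.drop (dist.length - i)).length = i := by
          simp; omega
        have hany : ∀ s, (PySem.List.permutations
              (PySem.List.slice dist (some (-(i : Int))) none) i).any
              (fun p => simA w2 (s + numW) s p)
            = bfsB w2 (s + numW) (dist.drop (dist.length - i)) s := by
          intro s
          rw [hds, bfsB_eq_dfsBF, hlen]
          exact perms_any_eq_dfsBF w2 (s + numW) i s _ hlen
        simp only [hany]
        split
        · rfl
        · exact ihm (i + 1) (by omega) (by omega)
      · simp [hile]
  intro i hi
  exact key (dist.length + 1 - i) i le_rfl hi

-- ===== VERDICT (by name: the statement is the Claim_ definition above) =====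
theorem solution_spec : Claim_equal_solution := by
  intro n weak dist _
  unfold Spec_solution solution solution_alt
  exact solGoA_eq_solGoB _ _ _ 1 le_rfl
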